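-- pv_equiv track=rewrite | github.com/dwallener/MoodRingMusic3 | TinyTran/prep_phrase_datasets.py | extract_phrases_from_spine
-- ===== SOURCE A (Python) =====
-- def extract_phrases_from_spine(spine_lines):
--     phrases = []
--     current_phrase = []
--
--     for token in spine_lines:
--         if token == "rest" or token == ".":
--             if current_phrase:
--                 phrases.append(current_phrase)
--                 current_phrase = []
--         else:
--             current_phrase.append(token)
--
--     if current_phrase:
--         phrases.append(current_phrase)
--
--     return phrases
-- ===== SOURCE B (Python) =====
-- def extract_phrases_from_spine(spine_lines):
--     n = len(spine_lines)
--     bounds = [-1] + [i for i, t in enumerate(spine_lines) if t == "rest" or t == "."] + [n]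
--     return [spine_lines[a + 1:b] for a, b in zip(bounds, bounds[1:]) if b - a > 1]
-- ===== Notes on version B (the rewrite author's own statement) =====
-- stated objective: alternative
-- what changed: Instead of a stateful accumulator loop, B first computes the list of delimiter positions, then materialises each phrase as a slice between consecutive boundaries, keeping only slices of positive length.
import Mathlib
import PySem

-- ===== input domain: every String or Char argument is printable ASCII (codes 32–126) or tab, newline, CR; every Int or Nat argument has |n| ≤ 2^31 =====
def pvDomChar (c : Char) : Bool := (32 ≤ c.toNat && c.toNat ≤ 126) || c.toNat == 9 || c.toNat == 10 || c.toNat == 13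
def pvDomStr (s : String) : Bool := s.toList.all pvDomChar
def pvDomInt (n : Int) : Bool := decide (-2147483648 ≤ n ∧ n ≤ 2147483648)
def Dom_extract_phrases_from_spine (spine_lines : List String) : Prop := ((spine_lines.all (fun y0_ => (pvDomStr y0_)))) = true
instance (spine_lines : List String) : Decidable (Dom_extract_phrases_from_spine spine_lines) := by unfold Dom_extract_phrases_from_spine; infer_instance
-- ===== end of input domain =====

-- B replaces A's stateful accumulator loop by a staged computation: collect delimiter
-- positions, then slice the list between consecutive boundaries (alternative; same cost).


-- ===== PORT A =====
-- for token in spine_lines: state = (phrases, current_phrase); then the final flush.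
def extract_phrases_from_spine (spine_lines : List String) : List (List String) :=
  let s := spine_lines.foldl
    (fun (s : List (List String) × List String) token =>
      if token == "rest" || token == "." then
        if s.2.isEmpty then s else (s.1 ++ [s.2], [])
      else (s.1, s.2 ++ [token]))
    ([], [])
  if s.2.isEmpty then s.1 else s.1 ++ [s.2]

-- ===== PORT B =====
-- bounds = [-1] + delimiter indices + [n]; a phrase is the slice between consecutive
-- boundaries when it is nonempty (b - a > 1); bounds[1:] is slice bounds 1 none.
def extract_phrases_from_spine_alt (spine_lines : List String) : List (List String) :=
  let n : Int := spine_lines.length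
  let bounds : List Int :=
    -1 :: (((PySem.List.enumerate spine_lines).filter
        (fun p => p.2 == "rest" || p.2 == ".")).map (fun p => p.1) ++ [n])
  ((bounds.zip (PySem.List.slice bounds (some 1) none)).filter
      (fun ab => ab.2 - ab.1 > 1)).map
    (fun ab => PySem.List.slice spine_lines (some (ab.1 + 1)) (some ab.2))

-- ===== PRECONDITION & SPEC =====
def Spec_extract_phrases_from_spine (spine_lines : List String) (out : List (List String)) : Prop := out = extract_phrases_from_spine_alt spine_lines
instance (spine_lines : List String) (out : List (List String)) : Decidable (Spec_extract_phrases_from_spine spine_lines out) := by unfold Spec_extract_phrases_from_spine; infer_instance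

-- ===== CLAIM (what is proved, stated in full; the proofs are below) =====
def Claim_equal_extract_phrases_from_spine : Prop := ∀ (spine_lines : List String), Dom_extract_phrases_from_spine spine_lines → Spec_extract_phrases_from_spine spine_lines (extract_phrases_from_spine spine_lines)

-- ===== LEMMAS AND PROOFS =====

-- proof-only helpers
def pvStep (s : List (List String) × List String) (token : String) :
    List (List String) × List String :=
  if token == "rest" || token == "." then
    if s.2.isEmpty then s else (s.1 ++ [s.2], [])
  else (s.1, s.2 ++ [token])

def pvFinish (s : List (List String) × List String) : List (List String) :=
  if s.2.isEmpty then s.1 else s.1 ++ [s.2]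

-- phrases A emits from state (·, cur) on the remaining tokens
def pvH : List String → List String → List (List String)
  | cur, [] => if cur.isEmpty then [] else [cur]
  | cur, t :: xs =>
    if t == "rest" || t == "." then
      (if cur.isEmpty then [] else [cur]) ++ pvH [] xs
    else pvH (cur ++ [t]) xs

-- canonical splitting: (head segment, remaining segments)
def pvSegsP : List String → List String × List (List String)
  | [] => ([], [])
  | t :: xs =>
    let p := pvSegsP xs
    if t == "rest" || t == "." then ([], p.1 :: p.2) else (t :: p.1, p.2)

-- delimiter positions
def pvD (xs : List String) : List Int :=
  ((PySem.List.enumerate xs).filter (fun p => p.2 == "rest" || p.2 == ".")).map (fun p => p.1)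

-- consecutive pairs a::l ↦ (a,b₁),(b₁,b₂),…
def pvPairs : Int → List Int → List (Int × Int)
  | _, [] => []
  | a, b :: l => (a, b) :: pvPairs b l

def pvChunks (xs : List String) (a : Int) (l : List Int) : List (List String) :=
  ((pvPairs a l).filter (fun ab => ab.2 - ab.1 > 1)).map
    (fun ab => PySem.List.slice xs (some (ab.1 + 1)) (some ab.2))

theorem pvH_foldl (xs : List String) : ∀ (ph : List (List String)) (cur : List String),
    pvFinish (xs.foldl pvStep (ph, cur)) = ph ++ pvH cur xs := by
  induction xs with
  | nil =>
    intro ph cur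
    by_cases h : cur.isEmpty
    · simp [pvFinish, pvH, h]
    · simp [pvFinish, pvH, h]
  | cons t xs ih =>
    intro ph cur
    rw [List.foldl_cons]
    by_cases hd : (t == "rest" || t == ".") = true
    · by_cases h : cur.isEmpty
      · have : pvStep (ph, cur) t = (ph, cur) := by simp [pvStep, hd, h]
        rw [this, ih, pvH, if_pos hd, if_pos h, List.nil_append]
        have hc : cur = [] := List.isEmpty_iff.mp h
        rw [hc]
      · have : pvStep (ph, cur) t = (ph ++ [cur], []) := by simp [pvStep, hd, h]
        rw [this, ih, pvH, if_pos hd, if_neg h, List.append_assoc, List.singleton_append]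
    · have : pvStep (ph, cur) t = (ph, cur ++ [t]) := by simp [pvStep, hd]
      rw [this, ih, pvH, if_neg hd]

theorem pvH_segs (xs : List String) : ∀ (cur : List String),
    pvH cur xs = ((cur ++ (pvSegsP xs).1) :: (pvSegsP xs).2).filter (fun l => !l.isEmpty) := by
  induction xs with
  | nil =>
    intro cur
    by_cases h : cur.isEmpty
    · simp [pvH, pvSegsP, h, List.filter]
    · simp [pvH, pvSegsP, h, List.filter]
  | cons t xs ih =>
    intro cur
    by_cases hd : (t == "rest" || t == ".") = true
    · rw [pvH, if_pos hd, ih []]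
      simp only [pvSegsP, if_pos hd, List.nil_append]
      by_cases h : cur.isEmpty
      · simp [List.filter, h]
      · simp [List.filter, h]
    · rw [pvH, if_neg hd, ih (cur ++ [t])]
      simp only [pvSegsP, if_neg hd]
      simp

-- ===== B side =====

theorem pvPairs_zip : ∀ (l : List Int) (a : Int), (a :: l).zip l = pvPairs a l := by
  intro l
  induction l with
  | nil => intro a; rfl
  | cons b l ih => intro a; simp only [List.zip_cons_cons, pvPairs, ih b]

theorem pvEnum_shift {α : Type} (xs : List α) : ∀ (s : Int),
    PySem.List.enumerate xs (s + 1) = (PySem.List.enumerate xs s).map (fun p => (p.1 + 1, p.2)) := by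
  induction xs with
  | nil => intro s; simp [PySem.List.enumerate_nil]
  | cons x xs ih =>
    intro s
    rw [PySem.List.enumerate_cons, PySem.List.enumerate_cons, List.map_cons]
    have : s + 1 + 1 = (s + 1) + 1 := by ring
    rw [this, ih (s + 1)]

theorem pvD_cons (t : String) (xs : List String) :
    pvD (t :: xs) = (if (t == "rest" || t == ".") = true then [(0 : Int)] else []) ++
      (pvD xs).map (· + 1) := by
  unfold pvD
  rw [PySem.List.enumerate_cons,
    show PySem.List.enumerate xs (0 + 1) = (PySem.List.enumerate xs 0).map (fun p => (p.1 + 1, p.2)) from pvEnum_shift xs 0]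
  by_cases hd : (t == "rest" || t == ".") = true
  · simp [List.filter_cons, hd, List.filter_map, Function.comp_def]
  · simp [List.filter_cons, hd, List.filter_map, Function.comp_def]

theorem pvSlice_shift (t : String) (xs : List String) (p b : Int) (hp : 0 ≤ p) (hb : 0 ≤ b) :
    PySem.List.slice (t :: xs) (some (p + 1)) (some (b + 1)) =
      PySem.List.slice xs (some p) (some b) := by
  rw [PySem.List.slice_toNat _ (by omega) (by omega),
    PySem.List.slice_toNat _ hp hb]
  have h1 : (p + 1).toNat = p.toNat + 1 := by omega
  rw [h1, List.drop_succ_cons]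
  congr 1
  omega

theorem pvSlice_take (xs : List String) (b : Int) (hb : 0 ≤ b) :
    PySem.List.slice xs (some 0) (some b) = xs.take b.toNat := by
  rw [PySem.List.slice_toNat _ (by omega) hb]
  simp

theorem pvChunks_cons (xs : List String) (a b : Int) (l : List Int) :
    pvChunks xs a (b :: l) =
      (if b - a > 1 then [PySem.List.slice xs (some (a + 1)) (some b)] else []) ++
        pvChunks xs b l := by
  unfold pvChunks
  simp only [pvPairs, List.filter_cons]
  by_cases hc : b - a > 1
  · simp [hc]
  · simp [hc]

theorem pvChunks_shift (t : String) (xs : List String) : ∀ (l : List Int) (a : Int),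
    -1 ≤ a → (∀ b ∈ l, 0 ≤ b) →
    pvChunks (t :: xs) (a + 1) (l.map (· + 1)) = pvChunks xs a l := by
  intro l
  induction l with
  | nil => intro a _ _; rfl
  | cons b l ih =>
    intro a ha hl
    have hb : 0 ≤ b := hl b (by simp)
    rw [List.map_cons, pvChunks_cons, pvChunks_cons,
      ih b (by omega) (fun x hx => hl x (by simp [hx]))]
    congr 1
    by_cases hc : b - a > 1
    · rw [if_pos (by omega : b + 1 - (a + 1) > 1), if_pos hc,
        pvSlice_shift t xs (a + 1) b (by omega) hb]
    · rw [if_neg (by omega : ¬ b + 1 - (a + 1) > 1), if_neg hc]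

theorem pvTakeEmpty (xs : List String) (b₁ : Int) (hbn : b₁ ≤ (xs.length : Int)) :
    (xs.take b₁.toNat).isEmpty = true ↔ b₁ ≤ 0 := by
  rw [List.isEmpty_iff, List.take_eq_nil_iff]
  constructor
  · rintro (h | h)
    · omega
    · subst h; simp at hbn; omega
  · intro h; left; omega

-- main invariant for B: boundaries characterise the canonical split
theorem pvStrong (xs : List String) :
    ∃ b₁ rest, pvD xs ++ [(xs.length : Int)] = b₁ :: rest ∧
      0 ≤ b₁ ∧ b₁ ≤ (xs.length : Int) ∧ (∀ b ∈ rest, 0 ≤ b) ∧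
      (pvSegsP xs).1 = xs.take b₁.toNat ∧
      pvChunks xs b₁ rest = (pvSegsP xs).2.filter (fun l => !l.isEmpty) := by
  induction xs with
  | nil =>
    refine ⟨0, [], ?_, le_refl _, by simp, by simp, rfl, rfl⟩
    simp [pvD, PySem.List.enumerate_nil]
  | cons t xs ih =>
    obtain ⟨b₁, rest, hl, hb0, hbn, hrest, hhead, hchunks⟩ := ih
    have hlen : ((t :: xs).length : Int) = (xs.length : Int) + 1 := by simp
    by_cases hd : (t == "rest" || t == ".") = true
    · refine ⟨0, (pvD xs ++ [(xs.length : Int)]).map (· + 1), ?_, le_refl _, by omega, ?_, ?_, ?_⟩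
      · rw [pvD_cons, if_pos hd, hlen]
        simp
      · intro b hb
        rw [hl] at hb
        simp only [List.map_cons, List.mem_cons, List.mem_map] at hb
        rcases hb with h | ⟨x, hx, hxe⟩
        · omega
        · have := hrest x hx; omega
      · simp [pvSegsP, hd]
      · rw [hl]
        have hsl : PySem.List.slice (t :: xs) (some ((0 : Int) + 1)) (some (b₁ + 1)) =
            xs.take b₁.toNat := by
          rw [pvSlice_shift t xs 0 b₁ (le_refl _) hb0, pvSlice_take xs b₁ hb0]
        show pvChunks (t :: xs) 0 ((b₁ :: rest).map (· + 1)) = (pvSegsP (t :: xs)).2.filter _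
        have hseg : (pvSegsP (t :: xs)).2 = (pvSegsP xs).1 :: (pvSegsP xs).2 := by
          simp [pvSegsP, hd]
        rw [List.map_cons, pvChunks_cons, pvChunks_shift t xs rest b₁ (by omega) hrest, hchunks,
          hseg, List.filter_cons]
        by_cases hpos : (0 : Int) < b₁
        · rw [if_pos (by omega : b₁ + 1 - 0 > 1), hsl]
          have hne : ((pvSegsP xs).1.isEmpty) = false := by
            rw [hhead]
            have := pvTakeEmpty xs b₁ hbn
            rcases h : (xs.take b₁.toNat).isEmpty with _ | _
            · rfl
            · exact absurd (this.mp h) (by omega)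
          rw [hhead] at hne ⊢
          simp [hne]
        · have hz : b₁ = 0 := by omega
          rw [if_neg (by omega : ¬ b₁ + 1 - 0 > 1)]
          have hemp : ((pvSegsP xs).1.isEmpty) = true := by
            rw [hhead, hz]; simp
          simp [hemp]
    · refine ⟨b₁ + 1, rest.map (· + 1), ?_, by omega, by omega, ?_, ?_, ?_⟩
      · rw [pvD_cons, if_neg hd, hlen, List.nil_append,
          show (pvD xs).map (· + 1) ++ [(xs.length : Int) + 1] =
            ((pvD xs) ++ [(xs.length : Int)]).map (· + 1) by simp, hl]
        simp
      · intro b hb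
        simp only [List.mem_map] at hb
        obtain ⟨x, hx, hxe⟩ := hb
        have := hrest x hx; omega
      · simp only [pvSegsP, if_neg hd]
        rw [show (b₁ + 1).toNat = b₁.toNat + 1 by omega, List.take_succ_cons, hhead]
      · simp only [pvSegsP, if_neg hd]
        rw [pvChunks_shift t xs rest b₁ (by omega) hrest, hchunks]

theorem pvB_eq (xs : List String) :
    extract_phrases_from_spine_alt xs =
      ((pvSegsP xs).1 :: (pvSegsP xs).2).filter (fun l => !l.isEmpty) := by
  obtain ⟨b₁, rest, hl, hb0, hbn, hrest, hhead, hchunks⟩ := pvStrong xs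
  have h0 : extract_phrases_from_spine_alt xs =
      (((-1 :: (pvD xs ++ [(xs.length : Int)])).zip
          (PySem.List.slice (-1 :: (pvD xs ++ [(xs.length : Int)])) (some 1) none)).filter
        (fun ab => ab.2 - ab.1 > 1)).map
        (fun ab => PySem.List.slice xs (some (ab.1 + 1)) (some ab.2)) := rfl
  rw [h0, hl, PySem.List.slice_from _ (by omega)]
  simp only [Int.toNat_one, List.drop_one, List.tail_cons]
  rw [pvPairs_zip (b₁ :: rest) (-1)]
  show pvChunks xs (-1) (b₁ :: rest) = _
  rw [pvChunks_cons, hchunks, List.filter_cons]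
  have hsl : PySem.List.slice xs (some ((-1 : Int) + 1)) (some b₁) = xs.take b₁.toNat := by
    rw [show ((-1 : Int) + 1) = (0 : Int) by ring, pvSlice_take xs b₁ hb0]
  by_cases hpos : (0 : Int) < b₁
  · rw [if_pos (by omega : b₁ - (-1) > 1), hsl]
    have hne : ((pvSegsP xs).1.isEmpty) = false := by
      rw [hhead]
      have := pvTakeEmpty xs b₁ hbn
      rcases h : (xs.take b₁.toNat).isEmpty with _ | _
      · rfl
      · exact absurd (this.mp h) (by omega)
    rw [hhead] at hne ⊢
    simp [hne]
  · have hz : b₁ = 0 := by omega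
    rw [if_neg (by omega : ¬ b₁ - (-1) > 1)]
    have hemp : ((pvSegsP xs).1.isEmpty) = true := by rw [hhead, hz]; simp
    simp [hemp]

-- ===== VERDICT (by name: the statement is the Claim_ definition above) =====
theorem extract_phrases_from_spine_spec : Claim_equal_extract_phrases_from_spine := by
  intro xs _
  show extract_phrases_from_spine xs = extract_phrases_from_spine_alt xs
  have hA : extract_phrases_from_spine xs = pvFinish (xs.foldl pvStep ([], [])) := rfl
  rw [hA, pvH_foldl xs [] [], List.nil_append, pvH_segs xs [], List.nil_append, pvB_eq]
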